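-- pv_equiv track=rewrite | github.com/trangyp/AMOS-Code | repo_doctor_omega/temporal/bisect_runner.py | _parse_first_bad
-- ===== SOURCE A (Python) =====
-- def _parse_first_bad(log: list[str]) -> str | None:
--     """Parse first bad commit from bisect log."""
--     for line in reversed(log):
--         if "bad" in line.lower() and ":" in line:
--             # Extract commit hash
--             parts = line.split(":")
--             if parts:
--                 commit = parts[0].strip()
--                 if len(commit) >= 8:
--                     return commit
--     return None
-- ===== SOURCE B (Python) =====
-- def _extract_bad_commit(line):
--     """Return the commit hash from one qualifying bisect-log line, else None."""
--     if "bad" not in line.lower() or ":" not in line: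
--         return None
--     commit = line.split(":")[0].strip()
--     return commit if len(commit) >= 8 else None
--
--
-- def _parse_first_bad(log: list[str]) -> str | None:
--     """Parse first bad commit from bisect log."""
--     result = None
--     for line in log:
--         c = _extract_bad_commit(line)
--         if c is not None:
--             result = c
--     return result
-- ===== Notes on version B (the rewrite author's own statement) =====
-- stated objective: alternative
-- what changed: Single forward fold that keeps overwriting the last qualifying commit via a separate extraction helper, instead of reverse iteration with early return and inline nested conditionals.
import Mathlib
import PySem

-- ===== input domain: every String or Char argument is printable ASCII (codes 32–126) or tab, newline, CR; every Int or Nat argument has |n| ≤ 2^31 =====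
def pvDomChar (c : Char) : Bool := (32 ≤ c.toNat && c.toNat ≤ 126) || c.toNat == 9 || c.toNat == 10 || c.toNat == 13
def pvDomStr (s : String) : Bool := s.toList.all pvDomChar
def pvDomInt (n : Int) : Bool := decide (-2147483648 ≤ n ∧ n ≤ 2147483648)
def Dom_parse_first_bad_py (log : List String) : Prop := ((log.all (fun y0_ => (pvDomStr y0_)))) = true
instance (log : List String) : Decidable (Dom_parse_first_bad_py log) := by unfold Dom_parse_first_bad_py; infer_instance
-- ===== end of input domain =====

-- B rewrites A's reverse scan with early return as a forward fold overwriting the last qualifying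
-- commit, extracted by a separate helper (objective: alternative decomposition; return value only).

-- ===== PORT A =====
-- 'for line in reversed(log): …' with early return: structural recursion over log.reverse
def parse_first_bad_go (lines : List String) : Option String :=
  match lines with
  | [] => none
  | line :: rest =>
    if PySem.Str.isIn "bad" (PySem.Str.lower line) && PySem.Str.isIn ":" line then
      let parts := (PySem.Str.split? line ":").getD []
      if !parts.isEmpty then
        let commit := PySem.Str.strip (parts.headD "")
        if 8 ≤ PySem.Str.len commit then some commit
        else parse_first_bad_go rest
      else parse_first_bad_go rest
    else parse_first_bad_go rest

def parse_first_bad_py (log : List String) : Option String :=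
  parse_first_bad_go log.reverse

-- ===== PORT B =====
-- line.split(":")[0]: split? with sep ":" ≠ "" is some, and the result is nonempty, so getD/headD are exact
def extract_bad_commit (line : String) : Option String :=
  if !PySem.Str.isIn "bad" (PySem.Str.lower line) || !PySem.Str.isIn ":" line then none
  else
    let commit := PySem.Str.strip (((PySem.Str.split? line ":").getD []).headD "")
    if 8 ≤ PySem.Str.len commit then some commit else none

def parse_first_bad_py_alt (log : List String) : Option String :=
  log.foldl (fun result line =>
    match extract_bad_commit line with
    | some c => some c
    | none => result) none

-- ===== PRECONDITION & SPEC =====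
def Spec_parse_first_bad_py (log : List String) (out : Option String) : Prop := out = parse_first_bad_py_alt log
instance (log : List String) (out : Option String) : Decidable (Spec_parse_first_bad_py log out) := by unfold Spec_parse_first_bad_py; infer_instance

-- ===== CLAIM (what is proved, stated in full; the proofs are below) =====
def Claim_equal_parse_first_bad_py : Prop := ∀ (log : List String), Dom_parse_first_bad_py log → Spec_parse_first_bad_py log (parse_first_bad_py log)

-- ===== LEMMAS AND PROOFS =====
lemma go_single (x : String) : parse_first_bad_go [x] = extract_bad_commit x := by
  unfold parse_first_bad_go extract_bad_commit
  cases hb : PySem.Str.isIn "bad" (PySem.Str.lower x) <;>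
    cases hc : PySem.Str.isIn ":" x <;>
      simp [parse_first_bad_go] <;>
        (by_cases hp : ((PySem.Str.split? x ":").getD []).isEmpty <;>
          simp_all [List.isEmpty_iff]; decide)

lemma go_append (a b : List String) :
    parse_first_bad_go (a ++ b) = (parse_first_bad_go a).or (parse_first_bad_go b) := by
  induction a with
  | nil => simp [parse_first_bad_go]
  | cons x xs ih =>
    rw [List.cons_append]
    conv_lhs => rw [parse_first_bad_go]
    conv_rhs => rw [parse_first_bad_go]
    split_ifs <;> (simp [ih]; try (split_ifs <;> simp))

lemma foldl_eq_go (l : List String) (acc : Option String) :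
    l.foldl (fun result line =>
      match extract_bad_commit line with
      | some c => some c
      | none => result) acc = (parse_first_bad_go l.reverse).or acc := by
  induction l generalizing acc with
  | nil => simp [parse_first_bad_go]
  | cons x xs ih =>
    rw [List.foldl_cons, List.reverse_cons, go_append, ih, go_single, Option.or_assoc]
    congr 1
    cases extract_bad_commit x <;> simp

-- ===== VERDICT (by name: the statement is the Claim_ definition above) =====
theorem parse_first_bad_py_spec : Claim_equal_parse_first_bad_py := by
  intro log _
  unfold Spec_parse_first_bad_py parse_first_bad_py parse_first_bad_py_alt
  rw [foldl_eq_go, Option.or_none]
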